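-- pv_equiv track=rewrite | github.com/thealper2/codewars-solutions | 7-kyu/get_free_wifi_anywhere_you_go.py | nonstop_hotspot
-- ===== SOURCE A (Python) =====
-- def nonstop_hotspot(area):
--     p_index = area.index('P')
--     left = area[:p_index]
--     right = area[p_index+1:]
--     count = 0
--
--     for i in range(len(left) - 1, -1, -1):
--         if left[i] == '#':
--             break
--
--         if left[i] == '*':
--             count += 1
--
--     for i in range(len(right)):
--         if right[i] == '#':
--             break
--
--         if right[i] == '*':
--             count += 1
--
--     return count
-- ===== SOURCE B (Python) =====
-- def nonstop_hotspot(area):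
--     count = 0
--     left = None
--     for ch in area:
--         if ch == '#':
--             if left is not None:
--                 return left + count
--             count = 0
--         elif ch == '*':
--             count += 1
--         elif ch == 'P' and left is None:
--             left = count
--             count = 0
--     if left is None:
--         raise ValueError("substring not found")
--     return left + count
-- ===== Notes on version B (the rewrite author's own statement) =====
-- stated objective: alternative
-- what changed: Replaces index('P')+slicing with two directional scan-with-break loops by one left-to-right state-machine pass over the whole string: a running star counter that resets at '#' (or ends the walk if P was already seen) and is latched into 'left' at the first 'P'.
import Mathlib
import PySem

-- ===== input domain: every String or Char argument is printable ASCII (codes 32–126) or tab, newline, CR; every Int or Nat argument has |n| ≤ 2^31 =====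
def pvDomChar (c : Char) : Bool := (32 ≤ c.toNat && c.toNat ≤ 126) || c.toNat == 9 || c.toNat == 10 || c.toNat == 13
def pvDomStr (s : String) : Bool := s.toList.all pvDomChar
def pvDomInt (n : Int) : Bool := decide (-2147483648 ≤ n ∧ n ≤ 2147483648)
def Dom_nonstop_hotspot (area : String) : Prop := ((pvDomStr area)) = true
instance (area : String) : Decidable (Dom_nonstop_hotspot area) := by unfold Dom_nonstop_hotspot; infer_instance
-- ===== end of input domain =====

-- B replaces A's index('P') + two directional scan-with-break loops over slices by a
-- single left-to-right state-machine pass over the whole string (objective: alternative).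

-- ===== PORT A =====
-- the scan-with-break loop shared by both of A's 'for … break' loops:
-- stops at '#', adds 1 for each '*' seen before it
def pvScanA : List Char → Int → Int
  | [], count => count
  | c :: rest, count =>
    if c = '#' then count
    else pvScanA rest (if c = '*' then count + 1 else count)

def nonstop_hotspot (area : String) : Int :=
  match PySem.List.index? area.toList 'P' with
  | none => 0   -- unreachable under Pre_ (area.index('P') raises ValueError)
  | some p =>
    let left := PySem.List.slice area.toList none (some (p : Int))
    let right := PySem.List.slice area.toList (some ((p : Int) + 1)) none
    -- 'for i in range(len(left)-1, -1, -1)' walks left back-to-front: scan left.reverse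
    pvScanA right (pvScanA left.reverse 0)

-- ===== PORT B =====
-- B's single for-loop with state (count, left : Option) and the early return at '#' once
-- 'P' has been seen; the counter resets at each '#' before 'P'
def pvScanB : List Char → Int → Option Int → Int
  | [], count, left =>
    match left with
    | some l => l + count
    | none => 0   -- unreachable under Pre_ (B raises ValueError there)
  | c :: rest, count, left =>
    if c = '#' then
      match left with
      | some l => l + count            -- early 'return left + count'
      | none => pvScanB rest 0 left    -- 'count = 0'
    else if c = '*' then pvScanB rest (count + 1) left
    else if c = 'P' ∧ left = none then pvScanB rest 0 (some count)
    else pvScanB rest count left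

def nonstop_hotspot_alt (area : String) : Int := pvScanB area.toList 0 none

-- ===== PRECONDITION & SPEC =====
-- Pre_ excludes exactly the inputs without a 'P', where both area.index('P') in A and
-- B's explicit raise produce a ValueError
def Pre_nonstop_hotspot (area : String) : Prop := 'P' ∈ area.toList
instance (area : String) : Decidable (Pre_nonstop_hotspot area) := by
  unfold Pre_nonstop_hotspot; infer_instance
def pvWitness_nonstop_hotspot : String := "*P*#*"

def Spec_nonstop_hotspot (area : String) (out : Int) : Prop := out = nonstop_hotspot_alt area
instance (area : String) (out : Int) : Decidable (Spec_nonstop_hotspot area out) := by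
  unfold Spec_nonstop_hotspot; infer_instance

-- ===== CLAIM (what is proved, stated in full; the proofs are below) =====
def Claim_equal_nonstop_hotspot : Prop := ∀ (area : String), Dom_nonstop_hotspot area → Pre_nonstop_hotspot area → Spec_nonstop_hotspot area (nonstop_hotspot area)

-- ===== LEMMAS AND PROOFS =====
theorem pvScanA_eq (xs : List Char) (c : Int) :
    pvScanA xs c = c + ((xs.takeWhile (· ≠ '#')).count '*' : Int) := by
  induction xs generalizing c with
  | nil => simp [pvScanA]
  | cons x rest ih =>
    by_cases hx : x = '#'
    · simp [pvScanA, hx, List.takeWhile]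
    · by_cases hs : x = '*'
      · simp [pvScanA, hs, ih, List.takeWhile]
        ring
      · simp [pvScanA, hx, hs, ih, List.takeWhile]

-- takeWhile (≠ '#') of a list with no '#' is the list itself
theorem tw_of_not_mem (l : List Char) (h : '#' ∉ l) : l.takeWhile (· ≠ '#') = l := by
  induction l with
  | nil => rfl
  | cons x l ih =>
    have hx : x ≠ '#' := fun hxe => h (hxe ▸ List.mem_cons_self)
    have hl : '#' ∉ l := fun hm => h (List.mem_cons_of_mem _ hm)
    rw [List.takeWhile_cons_of_pos (by simp [hx]), ih hl]

-- takeWhile (≠ '#') through a snoc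
theorem tw_snoc (l : List Char) (x : Char) :
    (l ++ [x]).takeWhile (· ≠ '#') =
      if '#' ∈ l then l.takeWhile (· ≠ '#') else l ++ [x].takeWhile (· ≠ '#') := by
  induction l with
  | nil => simp
  | cons y l ih =>
    by_cases hy : y = '#'
    · subst hy
      rw [List.cons_append, List.takeWhile_cons_of_neg (by simp),
        if_pos List.mem_cons_self, List.takeWhile_cons_of_neg (by simp)]
    · have hcons : ∀ (t : List Char), ((y :: t).takeWhile (· ≠ '#')) = y :: t.takeWhile (· ≠ '#') :=
        fun t => List.takeWhile_cons_of_pos (by simp [hy])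
    
      rw [List.cons_append, hcons, ih]
      by_cases hm : '#' ∈ l
      · rw [if_pos hm, if_pos (List.mem_cons_of_mem _ hm), hcons]
      · have hnm : ¬ ('#' ∈ y :: l) := by
          intro h
          rcases List.mem_cons.mp h with h | h
          · exact hy h.symm
          · exact hm h
        rw [if_neg hm, if_neg hnm, List.cons_append]

-- after 'P' has been latched, B counts stars until the first '#'
theorem pvScanB_some (xs : List Char) (c l : Int) :
    pvScanB xs c (some l) = l + c + ((xs.takeWhile (· ≠ '#')).count '*' : Int) := by
  induction xs generalizing c with
  | nil => simp [pvScanB]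
  | cons x rest ih =>
    by_cases hx : x = '#'
    · simp [pvScanB, hx, List.takeWhile]
    · by_cases hs : x = '*'
      · simp [pvScanB, hs, ih, List.takeWhile]; ring
      · simp [pvScanB, hx, hs, ih, List.takeWhile]

-- before 'P': B's running count equals c plus the stars after the last '#' of the prefix
theorem pvScanB_none (pre post : List Char) (c : Int) (hp : 'P' ∉ pre) :
    pvScanB (pre ++ 'P' :: post) c none =
      ((pre.reverse.takeWhile (· ≠ '#')).count '*' : Int)
        + (if '#' ∈ pre then 0 else c)
        + ((post.takeWhile (· ≠ '#')).count '*' : Int) := by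
  induction pre generalizing c with
  | nil => simp [pvScanB, pvScanB_some]
  | cons x pre' ih =>
    have hxP : x ≠ 'P' := fun h => hp (h ▸ List.mem_cons_self)
    have hp' : 'P' ∉ pre' := fun h => hp (List.mem_cons_of_mem _ h)
    have hrev : (x :: pre').reverse = pre'.reverse ++ [x] := by simp
    by_cases hx : x = '#'
    · have h1 : pvScanB ((x :: pre') ++ 'P' :: post) c none
          = pvScanB (pre' ++ 'P' :: post) 0 none := by
        simp [pvScanB, hx]
      rw [h1, ih 0 hp', hrev, tw_snoc]
      by_cases hm : '#' ∈ pre'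
      · simp [hm, hx]
      · have htw : List.takeWhile (fun a => !decide (a = '#')) pre'.reverse = pre'.reverse := by
          simpa using tw_of_not_mem _ (by simp [hm])
        simp [hm, hx, htw, List.count_reverse]
    · have hmem : ('#' ∈ x :: pre') ↔ ('#' ∈ pre') := by
        constructor
        · intro h; rcases List.mem_cons.mp h with h | h
          · exact absurd h.symm hx
          · exact h
        · exact List.mem_cons_of_mem _
      by_cases hs : x = '*'
      · have h1 : pvScanB ((x :: pre') ++ 'P' :: post) c none
            = pvScanB (pre' ++ 'P' :: post) (c + 1) none := by
          simp [pvScanB, hs]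
        rw [h1, ih (c + 1) hp', hrev, tw_snoc]
        by_cases hm : '#' ∈ pre'
        · simp [hm, hmem]
        · have htw : List.takeWhile (fun a => !decide (a = '#')) pre'.reverse = pre'.reverse := by
            simpa using tw_of_not_mem _ (by simp [hm])
          simp [hm, List.takeWhile, hs, htw, List.count_reverse]
          ring
      · have h1 : pvScanB ((x :: pre') ++ 'P' :: post) c none
            = pvScanB (pre' ++ 'P' :: post) c none := by
          simp [pvScanB, hx, hs, hxP]
        rw [h1, ih c hp', hrev, tw_snoc]
        by_cases hm : '#' ∈ pre'
        · simp [hm, hmem]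
        · have htw : List.takeWhile (fun a => !decide (a = '#')) pre'.reverse = pre'.reverse := by
            simpa using tw_of_not_mem _ (by simp [hm])
          simp [hm, hmem, List.takeWhile, hx, hs, htw, List.count_reverse]

-- ===== VERDICT (by name: the statement is the Claim_ definition above) =====
theorem nonstop_hotspot_spec : Claim_equal_nonstop_hotspot := by
  intro area _ hpre
  unfold Spec_nonstop_hotspot nonstop_hotspot nonstop_hotspot_alt
  cases h : PySem.List.index? area.toList 'P' with
  | none =>
    exact absurd hpre ((PySem.List.index?_eq_none_iff _ _).mp h)
  | some p =>
    obtain ⟨pre, suf, hsplit, hlen, hnp⟩ := (PySem.List.index?_eq_some_iff _ _ _).mp h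
    have hleft : PySem.List.slice area.toList none (some (p : Int)) = pre := by
      rw [PySem.List.slice_to_natCast, hsplit, ← hlen, List.take_left]
    have hright : PySem.List.slice area.toList (some ((p : Int) + 1)) none = suf := by
      have hc : ((p : Int) + 1) = ((p + 1 : Nat) : Int) := by push_cast; ring
      have hassoc : pre ++ 'P' :: suf = (pre ++ ['P']) ++ suf := by simp
      rw [hc, PySem.List.slice_from_natCast, hsplit, ← hlen, hassoc,
        List.drop_left' (by simp)]
    dsimp only
    rw [hleft, hright, hsplit]
    rw [pvScanB_none pre suf 0 hnp]
    simp only [pvScanA_eq]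
    split_ifs <;> ring
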